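-- pv_equiv track=rewrite | github.com/lilybhattacharjee5/traffic | utils.py | infer_dir
-- ===== SOURCE A (Python) =====
-- dir_trans = {
--     "left": (lambda x: x < 0, lambda y: y == 0),
--     "right": (lambda x: x > 0, lambda y: y == 0),
--     "up": (lambda x: x == 0, lambda y: y < 0),
--     "down": (lambda x: x == 0, lambda y: y > 0),
--     "diag_ru": (lambda x: x > 0, lambda y: y < 0),
--     "diag_rd": (lambda x: x > 0, lambda y: y > 0),
--     "diag_lu": (lambda x: x < 0, lambda y: y < 0),
--     "diag_ld": (lambda x: x < 0, lambda y: y > 0),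
--     "stay": (lambda x: x == 0, lambda y: y == 0),
-- }
--
-- def infer_dir(x1, y1, x2, y2):
--     x_trans = x2 - x1
--     y_trans = y2 - y1
--     for d, d_func in dir_trans.items():
--         x_func, y_func = d_func
--         if x_func(x_trans) and y_func(y_trans):
--             return d
--     return Error("direction could not be found")
-- ===== SOURCE B (Python) =====
-- _SIGN_DIRS = {
--     (-1, 0): "left",
--     (1, 0): "right",
--     (0, -1): "up",
--     (0, 1): "down",
--     (1, -1): "diag_ru",
--     (1, 1): "diag_rd",
--     (-1, -1): "diag_lu",
--     (-1, 1): "diag_ld",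
--     (0, 0): "stay",
-- }
--
-- def infer_dir(x1, y1, x2, y2):
--     sx = (x2 > x1) - (x2 < x1)
--     sy = (y2 > y1) - (y2 < y1)
--     return _SIGN_DIRS[(sx, sy)]
-- ===== Notes on version B (the rewrite author's own statement) =====
-- stated objective: idiomatic
-- what changed: Replaces A's loop over a dict of predicate-pair closures with computing the two displacement signs and one direct lookup in a table keyed by the sign pair.
import Mathlib
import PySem

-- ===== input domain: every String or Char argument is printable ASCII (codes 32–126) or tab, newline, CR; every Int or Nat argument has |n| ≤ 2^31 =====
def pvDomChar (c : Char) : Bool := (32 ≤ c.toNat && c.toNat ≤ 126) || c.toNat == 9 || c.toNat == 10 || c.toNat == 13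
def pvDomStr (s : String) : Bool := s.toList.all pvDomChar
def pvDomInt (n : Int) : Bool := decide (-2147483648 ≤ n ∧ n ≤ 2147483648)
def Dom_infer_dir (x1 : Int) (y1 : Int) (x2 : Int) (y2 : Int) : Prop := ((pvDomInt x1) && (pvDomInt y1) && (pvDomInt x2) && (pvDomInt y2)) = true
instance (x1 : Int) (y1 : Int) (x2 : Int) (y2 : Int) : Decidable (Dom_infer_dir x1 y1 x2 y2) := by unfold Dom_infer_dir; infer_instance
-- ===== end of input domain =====

-- B replaces the predicate-pair loop with a sign-pair computation and one table lookup (idiomatic, not faster).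


-- ===== PORT A =====
def infer_dir (x1 : Int) (y1 : Int) (x2 : Int) (y2 : Int) : String :=
  -- x_trans = x2 - x1; y_trans = y2 - y1; loop over dir_trans.items() in insertion order
  let x_trans := x2 - x1
  let y_trans := y2 - y1
  if x_trans < 0 ∧ y_trans = 0 then "left"
  else if x_trans > 0 ∧ y_trans = 0 then "right"
  else if x_trans = 0 ∧ y_trans < 0 then "up"
  else if x_trans = 0 ∧ y_trans > 0 then "down"
  else if x_trans > 0 ∧ y_trans < 0 then "diag_ru"
  else if x_trans > 0 ∧ y_trans > 0 then "diag_rd"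
  else if x_trans < 0 ∧ y_trans < 0 then "diag_lu"
  else if x_trans < 0 ∧ y_trans > 0 then "diag_ld"
  else if x_trans = 0 ∧ y_trans = 0 then "stay"
  else ""  -- unreachable on Int inputs: the nine cases cover all sign combinations (Python's fallthrough is dead code here)

-- ===== PORT B =====
-- B's sign table _SIGN_DIRS, a dict keyed by the pair of displacement signs
def signDirs : PySem.Dict (Int × Int) String :=
  PySem.Dict.ofList [((-1, 0), "left"), ((1, 0), "right"), ((0, -1), "up"), ((0, 1), "down"),
    ((1, -1), "diag_ru"), ((1, 1), "diag_rd"), ((-1, -1), "diag_lu"), ((-1, 1), "diag_ld"), ((0, 0), "stay")]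

def infer_dir_alt (x1 : Int) (y1 : Int) (x2 : Int) (y2 : Int) : String :=
  let sx : Int := (if x2 > x1 then 1 else 0) - (if x2 < x1 then 1 else 0)
  let sy : Int := (if y2 > y1 then 1 else 0) - (if y2 < y1 then 1 else 0)
  -- _SIGN_DIRS[(sx, sy)]: the key is always present for Int inputs (sx, sy ∈ {-1,0,1}), so KeyError is unreachable
  (PySem.Dict.get? signDirs (sx, sy)).getD ""

-- ===== PRECONDITION & SPEC =====
def Spec_infer_dir (x1 : Int) (y1 : Int) (x2 : Int) (y2 : Int) (out : String) : Prop := out = infer_dir_alt x1 y1 x2 y2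
instance (x1 : Int) (y1 : Int) (x2 : Int) (y2 : Int) (out : String) : Decidable (Spec_infer_dir x1 y1 x2 y2 out) := by unfold Spec_infer_dir; infer_instance

-- ===== CLAIM (what is proved, stated in full; the proofs are below) =====
def Claim_equal_infer_dir : Prop := ∀ (x1 : Int) (y1 : Int) (x2 : Int) (y2 : Int), Dom_infer_dir x1 y1 x2 y2 → Spec_infer_dir x1 y1 x2 y2 (infer_dir x1 y1 x2 y2)

-- ===== LEMMAS AND PROOFS =====

-- ===== VERDICT (by name: the statement is the Claim_ definition above) =====
-- B's lookup, written out as a decision on the two sign comparisons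
lemma infer_dir_alt_eq (x1 y1 x2 y2 : Int) : infer_dir_alt x1 y1 x2 y2 =
    if x2 < x1 then (if y2 < y1 then "diag_lu" else if y1 < y2 then "diag_ld" else "left")
    else if x1 < x2 then (if y2 < y1 then "diag_ru" else if y1 < y2 then "diag_rd" else "right")
    else (if y2 < y1 then "up" else if y1 < y2 then "down" else "stay") := by
  unfold infer_dir_alt
  split_ifs <;> first | decide | omega

theorem infer_dir_spec : Claim_equal_infer_dir := by
  intro x1 y1 x2 y2 _
  unfold Spec_infer_dir
  rw [infer_dir_alt_eq]
  dsimp only [infer_dir]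
  split_ifs <;> first | rfl | omega
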